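-- pv_equiv track=rewrite | github.com/Matt-Aurora-Ventures/Jarvis | scripts/solana_dex_backtest.py | merge_ohlcv_windows
-- ===== SOURCE A (Python) =====
-- from typing import Any, Dict, List, Optional, Tuple
--
-- def merge_ohlcv_windows(windows: List[List[List[Any]]]) -> List[List[Any]]:
--     seen = set()
--     merged: List[List[Any]] = []
--     for window in windows:
--         for row in window:
--             if not row:
--                 continue
--             ts = row[0]
--             if ts in seen:
--                 continue
--             seen.add(ts)
--             merged.append(row)
--     merged.sort(key=lambda row: row[0])
--     return merged
-- ===== SOURCE B (Python) =====
-- def merge_ohlcv_windows(windows):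
--     # Flatten all non-empty rows in original order, stable-sort by timestamp,
--     # then keep the first row of each run of equal timestamps.
--     rows = [row for window in windows for row in window if row]
--     rows.sort(key=lambda row: row[0])  # stable: original order kept among equal timestamps
--     merged = []
--     last_ts = None
--     for row in rows:
--         if merged and last_ts == row[0]:
--             continue
--         merged.append(row)
--         last_ts = row[0]
--     return merged
-- ===== Notes on version B (the rewrite author's own statement) =====
-- stated objective: alternative
-- what changed: Replaces the seen-set dedup-then-sort with sort-everything-first (stable) followed by a single linear adjacent-duplicate scan tracking only the last emitted timestamp, with no set at all.
import Mathlib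
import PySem

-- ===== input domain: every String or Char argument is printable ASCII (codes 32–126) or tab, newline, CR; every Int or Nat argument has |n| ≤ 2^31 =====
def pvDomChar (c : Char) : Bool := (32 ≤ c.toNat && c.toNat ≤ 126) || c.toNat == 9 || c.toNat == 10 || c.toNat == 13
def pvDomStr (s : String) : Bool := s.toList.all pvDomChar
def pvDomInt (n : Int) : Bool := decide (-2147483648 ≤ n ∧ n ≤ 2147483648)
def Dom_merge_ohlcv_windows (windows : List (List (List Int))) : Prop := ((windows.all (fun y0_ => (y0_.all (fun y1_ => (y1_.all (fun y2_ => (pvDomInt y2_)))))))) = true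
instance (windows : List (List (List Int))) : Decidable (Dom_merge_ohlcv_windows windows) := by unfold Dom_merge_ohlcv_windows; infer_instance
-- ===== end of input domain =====

-- B replaces A's seen-set dedup followed by a sort with one stable sort of all non-empty
-- rows followed by a linear adjacent-duplicate scan (objective: alternative algorithm).

-- ===== PORT A =====
def merge_ohlcv_windows (windows : List (List (List Int))) : List (List Int) :=
  let st := windows.foldl (fun (st : PySem.Set Int × List (List Int)) window =>
      window.foldl (fun (st : PySem.Set Int × List (List Int)) row =>
        if row = [] then st
        else
          let ts := PySem.List.pyGetD row 0 0
          if PySem.Set.contains st.1 ts then st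
          else (PySem.Set.add st.1 ts, st.2 ++ [row])) st)
    (PySem.Set.empty, [])
  PySem.List.sorted st.2 (fun row => PySem.List.pyGetD row 0 0)

-- ===== PORT B =====
def merge_ohlcv_windows_alt (windows : List (List (List Int))) : List (List Int) :=
  let rows := windows.flatMap (fun window => window.filter (fun row => decide (row ≠ [])))
  let srows := PySem.List.sorted rows (fun row => PySem.List.pyGetD row 0 0)
  (srows.foldl (fun (st : List (List Int) × Option Int) row =>
      if st.1 ≠ [] ∧ st.2 = some (PySem.List.pyGetD row 0 0) then st
      else (st.1 ++ [row], some (PySem.List.pyGetD row 0 0))) ([], none)).1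

-- ===== PRECONDITION & SPEC =====
def Spec_merge_ohlcv_windows (windows : List (List (List Int))) (out : List (List Int)) : Prop := out = merge_ohlcv_windows_alt windows
instance (windows : List (List (List Int))) (out : List (List Int)) : Decidable (Spec_merge_ohlcv_windows windows out) := by unfold Spec_merge_ohlcv_windows; infer_instance

-- ===== CLAIM (what is proved, stated in full; the proofs are below) =====
def Claim_equal_merge_ohlcv_windows : Prop := ∀ (windows : List (List (List Int))), Dom_merge_ohlcv_windows windows → Spec_merge_ohlcv_windows windows (merge_ohlcv_windows windows)

-- ===== LEMMAS AND PROOFS =====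

-- the sort key row[0] (rows reaching it are non-empty, so the default is never used)
def mkey (r : List Int) : Int := PySem.List.pyGetD r 0 0

-- A's dedup loop, as structural recursion: kept rows / final seen set
def dk : List (List Int) → PySem.Set Int → List (List Int)
  | [], _ => []
  | r :: rs, s =>
    if PySem.Set.contains s (mkey r) then dk rs s
    else r :: dk rs (PySem.Set.add s (mkey r))

def dks : List (List Int) → PySem.Set Int → PySem.Set Int
  | [], s => s
  | r :: rs, s =>
    if PySem.Set.contains s (mkey r) then dks rs s
    else dks rs (PySem.Set.add s (mkey r))

-- B's adjacent-dedup scan, as structural recursion: kept rows / final last timestamp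
def adh : List (List Int) → Int → List (List Int)
  | [], _ => []
  | r :: rs, t => if mkey r = t then adh rs t else r :: adh rs (mkey r)

def adl : List (List Int) → Int → Int
  | [], t => t
  | r :: rs, t => if mkey r = t then adl rs t else adl rs (mkey r)

def bdd : List (List Int) → List (List Int)
  | [] => []
  | r :: rs => r :: adh rs (mkey r)

lemma mkey_def (r : List Int) : PySem.List.pyGetD r 0 0 = mkey r := rfl

lemma foldl_skip (l : List (List Int)) (st0 : PySem.Set Int × List (List Int)) :
    l.foldl (fun st row => if row = [] then st
        else if PySem.Set.contains st.1 (mkey row) then st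
        else (PySem.Set.add st.1 (mkey row), st.2 ++ [row])) st0
    = (l.filter (fun row => decide (row ≠ []))).foldl (fun st row =>
        if PySem.Set.contains st.1 (mkey row) then st
        else (PySem.Set.add st.1 (mkey row), st.2 ++ [row])) st0 := by
  induction l generalizing st0 with
  | nil => rfl
  | cons r rs ih =>
    rw [List.foldl_cons, List.filter_cons]
    by_cases h : r = []
    · rw [if_pos h, if_neg (show ¬decide (r ≠ []) = true by simp [h])]
      exact ih st0
    · rw [if_neg h, if_pos (show decide (r ≠ []) = true by simp [h]), List.foldl_cons]
      exact ih _

lemma flatten_filter (windows : List (List (List Int))) :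
    (windows.flatten).filter (fun row => decide (row ≠ []))
      = windows.flatMap (fun w => w.filter (fun row => decide (row ≠ []))) := by
  induction windows with
  | nil => rfl
  | cons w ws ih =>
    rw [List.flatten_cons, List.filter_append, ih, List.flatMap_cons]

lemma foldl_dk (l : List (List Int)) (s : PySem.Set Int) (acc : List (List Int)) :
    l.foldl (fun st row =>
        if PySem.Set.contains st.1 (mkey row) then st
        else (PySem.Set.add st.1 (mkey row), st.2 ++ [row])) (s, acc)
      = (dks l s, acc ++ dk l s) := by
  induction l generalizing s acc with
  | nil => simp [dk, dks]
  | cons r rs ih =>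
    simp only [List.foldl_cons, dk, dks]
    by_cases h : PySem.Set.contains s (mkey r) = true
    · simp only [if_pos h]; rw [ih]
    · simp only [if_neg h]; rw [ih]; simp

lemma merged_eq (windows : List (List (List Int))) :
    merge_ohlcv_windows windows
      = PySem.List.sorted (dk (windows.flatMap (fun w => w.filter (fun row => decide (row ≠ [])))) PySem.Set.empty) mkey := by
  simp only [merge_ohlcv_windows, mkey_def]
  rw [← List.foldl_flatten, foldl_skip, foldl_dk, flatten_filter]
  simp

lemma foldl_adh (l : List (List Int)) (acc : List (List Int)) (t : Int) (h : acc ≠ []) :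
    l.foldl (fun (st : List (List Int) × Option Int) row =>
        if st.1 ≠ [] ∧ st.2 = some (mkey row) then st
        else (st.1 ++ [row], some (mkey row))) (acc, some t)
      = (acc ++ adh l t, some (adl l t)) := by
  induction l generalizing acc t with
  | nil => simp [adh, adl]
  | cons r rs ih =>
    by_cases hk : mkey r = t
    · simp only [List.foldl_cons, adh, adl, if_pos hk]
      rw [if_pos ⟨h, by rw [hk]⟩]
      exact ih acc t h
    · simp only [List.foldl_cons, adh, adl, if_neg hk]
      rw [if_neg (by rintro ⟨-, he⟩; exact hk (Option.some.inj he).symm)]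
      rw [ih (acc ++ [r]) (mkey r) (by simp)]
      simp

lemma alt_eq (windows : List (List (List Int))) :
    merge_ohlcv_windows_alt windows
      = bdd (PySem.List.sorted (windows.flatMap (fun w => w.filter (fun row => decide (row ≠ [])))) mkey) := by
  simp only [merge_ohlcv_windows_alt, mkey_def]
  generalize PySem.List.sorted (windows.flatMap (fun w => w.filter (fun row => decide (row ≠ [])))) mkey = S
  cases S with
  | nil => rfl
  | cons h tl =>
    rw [bdd, List.foldl_cons, if_neg (by simp)]
    simp only [List.nil_append]
    rw [foldl_adh tl [h] (mkey h) (by simp)]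
    simp

lemma adh_mem (l : List (List Int)) (t : Int) (r : List Int)
    (hp : l.Pairwise (fun a b => mkey a ≤ mkey b)) (hlb : ∀ x ∈ l, t ≤ mkey x) :
    r ∈ adh l t ↔ mkey r ≠ t ∧ l.find? (fun x => mkey x == mkey r) = some r := by
  induction l generalizing t with
  | nil => simp [adh]
  | cons x xs ih =>
    obtain ⟨hx, hxs⟩ := List.pairwise_cons.mp hp
    have hlbx := hlb x (by simp)
    by_cases h : mkey x = t
    · rw [adh, if_pos h, ih t hxs (fun y hy => h ▸ hx y hy)]
      by_cases hk : mkey x = mkey r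
      · have hrt : mkey r = t := hk ▸ h
        rw [List.find?_cons_of_pos (by simp [hk])]
        simp [hrt]
      · rw [List.find?_cons_of_neg (by simp [hk])]
    · have ht : t < mkey x := lt_of_le_of_ne hlbx (Ne.symm h)
      rw [adh, if_neg h, List.mem_cons, ih (mkey x) hxs hx]
      by_cases hk : mkey x = mkey r
      · rw [List.find?_cons_of_pos (by simp [hk])]
        constructor
        · rintro (rfl | ⟨hne, -⟩)
          · exact ⟨by rw [← hk]; exact h, rfl⟩
          · exact absurd hk.symm hne
        · rintro ⟨-, hxr⟩
          exact Or.inl (Option.some.inj hxr).symm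
      · rw [List.find?_cons_of_neg (by simp [hk])]
        constructor
        · rintro (rfl | ⟨hne, hF⟩)
          · exact absurd rfl hk
          · have hmem := List.mem_of_find?_eq_some hF
            exact ⟨ne_of_gt (lt_of_lt_of_le ht (hx r hmem)), hF⟩
        · rintro ⟨hne, hF⟩
          exact Or.inr ⟨fun e => hk e.symm, hF⟩

lemma adh_pairwise (l : List (List Int)) (t : Int)
    (hp : l.Pairwise (fun a b => mkey a ≤ mkey b)) (hlb : ∀ x ∈ l, t ≤ mkey x) :
    (adh l t).Pairwise (fun a b => mkey a < mkey b) ∧ ∀ r ∈ adh l t, t < mkey r := by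
  induction l generalizing t with
  | nil => simp [adh]
  | cons x xs ih =>
    obtain ⟨hx, hxs⟩ := List.pairwise_cons.mp hp
    by_cases h : mkey x = t
    · rw [adh, if_pos h]
      exact ih t hxs (fun y hy => h ▸ hx y hy)
    · rw [adh, if_neg h]
      have ht : t < mkey x := lt_of_le_of_ne (hlb x (by simp)) (Ne.symm h)
      obtain ⟨hpw, hgt⟩ := ih (mkey x) hxs hx
      refine ⟨List.pairwise_cons.mpr ⟨hgt, hpw⟩, ?_⟩
      intro r hr
      rcases List.mem_cons.mp hr with rfl | hr
      · exact ht
      · exact lt_trans ht (hgt r hr)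

lemma bdd_pairwise (xs : List (List Int)) :
    (bdd (PySem.List.sorted xs mkey)).Pairwise (fun a b => mkey a < mkey b) := by
  have hp := PySem.List.sorted_pairwise xs mkey
  cases hS : PySem.List.sorted xs mkey with
  | nil => simp [bdd]
  | cons h tl =>
    rw [hS] at hp
    obtain ⟨hh, htl⟩ := List.pairwise_cons.mp hp
    rw [bdd]
    obtain ⟨hpw, hgt⟩ := adh_pairwise tl (mkey h) htl hh
    exact List.pairwise_cons.mpr ⟨hgt, hpw⟩

lemma bdd_mem (xs : List (List Int)) (r : List Int) :
    r ∈ bdd (PySem.List.sorted xs mkey) ↔ (PySem.List.sorted xs mkey).find? (fun x => mkey x == mkey r) = some r := by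
  have hp := PySem.List.sorted_pairwise xs mkey
  cases hS : PySem.List.sorted xs mkey with
  | nil => simp [bdd]
  | cons h tl =>
    rw [hS] at hp
    obtain ⟨hh, htl⟩ := List.pairwise_cons.mp hp
    rw [bdd, List.mem_cons, adh_mem tl (mkey h) r htl hh]
    by_cases hk : mkey h = mkey r
    · rw [List.find?_cons_of_pos (by simp [hk])]
      constructor
      · rintro (rfl | ⟨hne, -⟩)
        · rfl
        · exact absurd hk.symm hne
      · intro hsome
        exact Or.inl (Option.some.inj hsome).symm
    · rw [List.find?_cons_of_neg (by simp [hk])]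
      constructor
      · rintro (rfl | ⟨-, hF⟩)
        · exact absurd rfl hk
        · exact hF
      · intro hF
        exact Or.inr ⟨fun e => hk e.symm, hF⟩

lemma dk_mem (l : List (List Int)) (s : PySem.Set Int) (r : List Int) :
    r ∈ dk l s ↔ mkey r ∉ s ∧ l.find? (fun x => mkey x == mkey r) = some r := by
  induction l generalizing s with
  | nil => simp [dk]
  | cons x xs ih =>
    rw [dk]
    by_cases hc : PySem.Set.contains s (mkey x) = true
    · have hmem : mkey x ∈ s := by simpa [PySem.Set.contains] using hc
      rw [if_pos hc, ih]
      by_cases hk : mkey x = mkey r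
      · rw [List.find?_cons_of_pos (by simp [hk])]
        constructor
        · rintro ⟨hns, -⟩; exact absurd (hk ▸ hmem) hns
        · rintro ⟨hns, -⟩; exact absurd (hk ▸ hmem) hns
      · rw [List.find?_cons_of_neg (by simp [hk])]
    · have hns : mkey x ∉ s := by simpa [PySem.Set.contains] using hc
      rw [if_neg hc, List.mem_cons, ih]
      by_cases hk : mkey x = mkey r
      · rw [List.find?_cons_of_pos (by simp [hk])]
        constructor
        · rintro (rfl | ⟨hna, -⟩)
          · exact ⟨hk ▸ hns, rfl⟩
          · exact absurd ((PySem.Set.mem_add s (mkey x) (mkey r)).mpr (Or.inr hk.symm)) hna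
        · rintro ⟨-, hsome⟩
          exact Or.inl (Option.some.inj hsome).symm
      · rw [List.find?_cons_of_neg (by simp [hk])]
        constructor
        · rintro (rfl | ⟨hna, hF⟩)
          · exact absurd rfl hk
          · exact ⟨fun hm => hna ((PySem.Set.mem_add _ _ _).mpr (Or.inl hm)), hF⟩
        · rintro ⟨hns', hF⟩
          refine Or.inr ⟨fun hm => ?_, hF⟩
          rcases (PySem.Set.mem_add _ _ _).mp hm with h' | h'
          · exact hns' h'
          · exact hk h'.symm

lemma dk_keys_nodup (l : List (List Int)) (s : PySem.Set Int) :
    ((dk l s).map mkey).Nodup ∧ ∀ r ∈ dk l s, mkey r ∉ s := by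
  induction l generalizing s with
  | nil => simp [dk]
  | cons x xs ih =>
    rw [dk]
    by_cases hc : PySem.Set.contains s (mkey x) = true
    · rw [if_pos hc]
      exact ih s
    · have hns : mkey x ∉ s := by simpa [PySem.Set.contains] using hc
      rw [if_neg hc]
      obtain ⟨hnd, hnotin⟩ := ih (PySem.Set.add s (mkey x))
      constructor
      · rw [List.map_cons, List.nodup_cons]
        refine ⟨fun hmem => ?_, hnd⟩
        rcases List.mem_map.mp hmem with ⟨r, hr, hkr⟩
        exact hnotin r hr (hkr ▸ (PySem.Set.mem_add _ _ _).mpr (Or.inr rfl))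
      · intro r hr
        rcases List.mem_cons.mp hr with rfl | hr'
        · exact hns
        · exact fun hrs => hnotin r hr' ((PySem.Set.mem_add _ _ _).mpr (Or.inl hrs))

lemma filter_insertBy (x : List Int) (k : Int) (acc : List (List Int))
    (hp : acc.Pairwise (fun a b => mkey a ≤ mkey b)) :
    (PySem.List.insertBy (fun a b => decide (mkey a < mkey b)) x acc).filter (fun r => mkey r == k)
      = acc.filter (fun r => mkey r == k) ++ if mkey x == k then [x] else [] := by
  induction acc with
  | nil => simp [PySem.List.insertBy, List.filter_cons]
  | cons y ys ih =>
    obtain ⟨hy, hys⟩ := List.pairwise_cons.mp hp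
    rw [PySem.List.insertBy]
    by_cases hlt : mkey x < mkey y
    · rw [if_pos (by simpa using hlt)]
      by_cases hxk : mkey x = k
      · have hall : ∀ z ∈ y :: ys, ¬ ((mkey z == k) = true) := by
          intro z hz
          have hzy : mkey y ≤ mkey z := by
            rcases List.mem_cons.mp hz with rfl | hz'
            · exact le_refl _
            · exact hy z hz'
          simp only [beq_iff_eq]
          omega
        rw [List.filter_cons_of_pos (by simp [hxk]), List.filter_eq_nil_iff.mpr hall]
        simp [hxk]
      · rw [List.filter_cons_of_neg (by simp [hxk])]
        simp [hxk]
    · rw [if_neg (by simpa using hlt)]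
      rw [List.filter_cons, List.filter_cons, ih hys]
      split <;> simp

lemma filter_sorted (xs : List (List Int)) (k : Int) :
    (PySem.List.sorted xs mkey).filter (fun r => mkey r == k) = xs.filter (fun r => mkey r == k) := by
  induction xs using List.reverseRecOn with
  | nil => simp [PySem.List.sorted_eq_foldl_insertBy]
  | append_singleton ys x ih =>
    rw [PySem.List.sorted_eq_foldl_insertBy, List.foldl_append, List.foldl_cons, List.foldl_nil,
      ← PySem.List.sorted_eq_foldl_insertBy,
      filter_insertBy x k _ (PySem.List.sorted_pairwise ys mkey), ih,
      List.filter_append, List.filter_cons]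
    split <;> simp

lemma find?_sorted (xs : List (List Int)) (k : Int) :
    (PySem.List.sorted xs mkey).find? (fun r => mkey r == k) = xs.find? (fun r => mkey r == k) := by
  rw [← List.head?_filter, ← List.head?_filter, filter_sorted]

lemma nodup_of_pairwise_lt (l : List (List Int)) (h : l.Pairwise (fun a b => mkey a < mkey b)) : l.Nodup := by
  refine h.imp ?_
  intro a b hab hEq
  subst hEq
  exact lt_irrefl _ hab

-- ===== VERDICT (by name: the statement is the Claim_ definition above) =====
theorem merge_ohlcv_windows_spec : Claim_equal_merge_ohlcv_windows := by
  intro windows _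
  show merge_ohlcv_windows windows = merge_ohlcv_windows_alt windows
  set rows := windows.flatMap (fun w => w.filter (fun row => decide (row ≠ []))) with hrows
  rw [merged_eq, alt_eq]
  apply PySem.List.sorted_eq_of_perm_of_pairwise_lt
  · -- (bdd (sorted rows)).Perm (dk rows ∅)
    have hnb := nodup_of_pairwise_lt _ (bdd_pairwise rows)
    have hnd : (dk rows PySem.Set.empty).Nodup :=
      List.Nodup.of_map mkey (dk_keys_nodup rows PySem.Set.empty).1
    rw [List.perm_ext_iff_of_nodup hnb hnd]
    intro r
    rw [bdd_mem, dk_mem, find?_sorted]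
    simp [PySem.Set.empty]
  · exact bdd_pairwise rows
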